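-- pv_equiv track=rewrite | github.com/rajathjn/shorts_maker | ShortsMaker/shorts_maker.py | split_alpha_and_digit
-- ===== SOURCE A (Python) =====
-- def split_alpha_and_digit(word):
--     """
--     Splits a given string into separate segments of alphabetic and numeric sequences.
--
--     This function processes each character in the input string and divides it into
--     distinct groups of alphabetic sequences and numeric sequences. A space is added
--     between these groups whenever a transition occurs between alphabetic and numeric
--     characters, or vice versa. Non-alphanumeric characters are included as is without
--     causing a split.
--
--     Args:
--         word (str): The input string to be split into alphabetic and numeric
--             segments.
--
--     Returns:
--         str: A string where alphabetic and numeric segments from the input are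
--             separated by a space while retaining other characters.
--     """
--     res = ""
--     alpha = False
--     digit = False
--     for character in word:
--         if character.isalpha():
--             alpha = True
--             if digit:
--                 res += " "
--                 digit = False
--             res += character
--         elif character.isdigit():
--             digit = True
--             if alpha:
--                 res += " "
--                 alpha = False
--             res += character
--         else:
--             res += character
--     return res
-- ===== SOURCE B (Python) =====
-- def split_alpha_and_digit(word):
--     def kind(c):
--         if c.isalpha():
--             return 0
--         if c.isdigit():
--             return 1
--         return 2
--
--     res = ""
--     last = None  # kind of the most recent alpha/digit run, persists across 'other' runs
--     i = 0
--     n = len(word)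
--     while i < n:
--         k = kind(word[i])
--         j = i + 1
--         while j < n and kind(word[j]) == k:
--             j += 1
--         run = word[i:j]
--         if k == 2:
--             res += run
--         else:
--             if last is not None and last != k:
--                 res += " "
--             res += run
--             last = k
--         i = j
--     return res
-- ===== Notes on version B (the rewrite author's own statement) =====
-- stated objective: alternative
-- what changed: B scans the string run-by-run (grouping maximal same-class runs with an inner scan and remembering the last alpha/digit run kind in one Option-like variable) instead of A's per-character loop over two boolean flags.
import Mathlib
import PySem

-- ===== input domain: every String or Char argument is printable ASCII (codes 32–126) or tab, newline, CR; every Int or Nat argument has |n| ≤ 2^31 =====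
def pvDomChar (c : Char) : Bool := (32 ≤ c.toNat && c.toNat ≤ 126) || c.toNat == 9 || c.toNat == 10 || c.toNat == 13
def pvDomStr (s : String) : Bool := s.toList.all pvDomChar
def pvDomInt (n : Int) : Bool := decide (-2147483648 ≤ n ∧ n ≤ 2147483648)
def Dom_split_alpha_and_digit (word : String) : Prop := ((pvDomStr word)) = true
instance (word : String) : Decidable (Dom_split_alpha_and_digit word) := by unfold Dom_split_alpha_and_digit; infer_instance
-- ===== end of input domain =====

-- B replaces A's per-character two-boolean-flag loop by a run-by-run scan that groups maximal
-- same-class runs and remembers the last alpha/digit run kind; alternative decomposition, same cost.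


-- ===== PORT A =====
-- literal port of A's character loop: res accumulator (as a char list) plus the two booleans alpha / digit;
-- PySem.Chars.isalpha / isdigit are Python's char-level str.isalpha / str.isdigit (exact on the ASCII domain)
def loopA : List Char → List Char → Bool → Bool → List Char
  | [], res, _, _ => res
  | c :: cs, res, alpha, digit =>
    if PySem.Chars.isalpha c then
      -- alpha := True; if digit: res += " "; digit := False; res += c
      if digit then loopA cs (res ++ [' ', c]) true false
      else loopA cs (res ++ [c]) true digit
    else if PySem.Chars.isdigit c then
      -- digit := True; if alpha: res += " "; alpha := False; res += c
      if alpha then loopA cs (res ++ [' ', c]) false true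
      else loopA cs (res ++ [c]) alpha true
    else
      loopA cs (res ++ [c]) alpha digit

def split_alpha_and_digit (word : String) : String :=
  String.ofList (loopA word.toList [] false false)

-- ===== PORT B =====
-- kind : 0 = alpha, 1 = digit, 2 = other (isalpha tested first, as in Source B)
def kindB (c : Char) : Nat :=
  if PySem.Chars.isalpha c then 0 else if PySem.Chars.isdigit c then 1 else 2

-- Source B's outer while loop: peel off the maximal run of the head's kind (the inner while = takeWhile/dropWhile),
-- append it (with a separating space when the run is alpha/digit and its kind differs from `last`), recurse on the rest
def loopB : List Char → Option Nat → List Char → List Char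
  | [], _, res => res
  | c :: cs, last, res =>
    let k := kindB c
    let t := cs.takeWhile (fun d => kindB d == k)
    let r := cs.dropWhile (fun d => kindB d == k)
    if k == 2 then
      loopB r last (res ++ c :: t)
    else if last.isSome && last ≠ some k then
      loopB r (some k) (res ++ ' ' :: c :: t)
    else
      loopB r (some k) (res ++ c :: t)
  termination_by cs => cs.length
  decreasing_by
    all_goals simp only [List.length_cons]
    all_goals exact Nat.lt_succ_of_le (List.length_dropWhile_le _ _)

def split_alpha_and_digit_alt (word : String) : String :=
  String.ofList (loopB word.toList none [])

-- ===== PRECONDITION & SPEC =====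
def Spec_split_alpha_and_digit (word : String) (out : String) : Prop := out = split_alpha_and_digit_alt word
instance (word : String) (out : String) : Decidable (Spec_split_alpha_and_digit word out) := by unfold Spec_split_alpha_and_digit; infer_instance

-- ===== CLAIM (what is proved, stated in full; the proofs are below) =====
def Claim_equal_split_alpha_and_digit : Prop := ∀ (word : String), Dom_split_alpha_and_digit word → Spec_split_alpha_and_digit word (split_alpha_and_digit word)

-- ===== LEMMAS AND PROOFS =====

theorem tw_all_append {p : Char → Bool} {t r : List Char} (h : ∀ x ∈ t, p x = true) :
    (t ++ r).takeWhile p = t ++ r.takeWhile p := by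
  induction t with
  | nil => simp
  | cons a t ih =>
    simp only [List.cons_append, List.takeWhile_cons, h a (by simp)]
    simp [ih (fun x hx => h x (by simp [hx]))]

theorem dw_all_append {p : Char → Bool} {t r : List Char} (h : ∀ x ∈ t, p x = true) :
    (t ++ r).dropWhile p = r.dropWhile p := by
  induction t with
  | nil => simp
  | cons a t ih =>
    simp only [List.cons_append, List.dropWhile_cons, h a (by simp)]
    exact ih (fun x hx => h x (by simp [hx]))

theorem tw_dw (p : Char → Bool) (l : List Char) : (l.dropWhile p).takeWhile p = [] := by
  induction l with
  | nil => simp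
  | cons a l ih =>
    by_cases h : p a = true
    · simpa [List.dropWhile_cons, h] using ih
    · simp [h]

theorem dw_of_tw_nil {p : Char → Bool} {l : List Char} (h : l.takeWhile p = []) :
    l.dropWhile p = l := by
  cases l with
  | nil => simp
  | cons a l =>
    by_cases hp : p a = true
    · simp [hp] at h
    · simp [hp]

-- the (space and) character emitted for one character, and the updated `last`
def pfxB (c : Char) (last : Option Nat) : List Char :=
  (if kindB c ≠ 2 ∧ last.isSome ∧ last ≠ some (kindB c) then [' '] else []) ++ [c]

def nextB (c : Char) (last : Option Nat) : Option Nat :=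
  if kindB c = 2 then last else some (kindB c)

-- absorbing a leading run of kind k into loopB when `last` already is that kind (or the run is 'other')
theorem loopB_absorb (k : Nat) (t r : List Char) (last : Option Nat) (res : List Char)
    (ht : ∀ x ∈ t, kindB x = k) (hr : r.takeWhile (fun d => kindB d == k) = [])
    (hlast : k = 2 ∨ last = some k) :
    loopB (t ++ r) last res = loopB r last (res ++ t) := by
  cases t with
  | nil => simp
  | cons a t =>
    have hka : kindB a = k := ht a (by simp)
    have htall : ∀ x ∈ t, (fun d => kindB d == k) x = true := by
      intro x hx; simp [ht x (by simp [hx])]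
    rw [List.cons_append, loopB]
    simp only [hka, tw_all_append htall, hr, List.append_nil, dw_all_append htall,
      dw_of_tw_nil hr]
    rcases hlast with h2 | hsome
    · simp [h2]
    · by_cases h2 : k = 2
      · simp [h2]
      · simp [h2, hsome]

-- loopB processes a single character exactly like A does, run-grouping notwithstanding
theorem loopB_cons (c : Char) (cs : List Char) (last : Option Nat) (res : List Char) :
    loopB (c :: cs) last res = loopB cs (nextB c last) (res ++ pfxB c last) := by
  have hsplit : cs = cs.takeWhile (fun d => kindB d == kindB c) ++
      cs.dropWhile (fun d => kindB d == kindB c) := (List.takeWhile_append_dropWhile).symm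
  have ht : ∀ x ∈ cs.takeWhile (fun d => kindB d == kindB c), kindB x = kindB c := by
    intro x hx
    simpa using List.mem_takeWhile_imp hx
  have hr := tw_dw (fun d => kindB d == kindB c) cs
  rw [loopB]
  conv_rhs => rw [hsplit]
  rw [loopB_absorb (kindB c) _ _ _ _ ht hr
        (by unfold nextB; by_cases h2 : kindB c = 2 <;> simp [h2])]
  by_cases h2 : kindB c = 2
  · simp [h2, nextB, pfxB]
  · by_cases hsp : last.isSome ∧ last ≠ some (kindB c)
    · simp [h2, nextB, pfxB, hsp.1, hsp.2]
    · have hcond : ¬ (last.isSome = true ∧ ¬ last = some (kindB c)) := fun h => hsp ⟨h.1, h.2⟩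
      simp [h2, nextB, pfxB, hcond]

theorem mainA (cs : List Char) (res : List Char) (last : Option Nat)
    (hvalid : last = none ∨ last = some 0 ∨ last = some 1) :
    loopA cs res (last == some 0) (last == some 1) = loopB cs last res := by
  induction cs generalizing res last with
  | nil => simp [loopA, loopB]
  | cons c cs ih =>
    rw [loopB_cons]
    have hvalid' : nextB c last = none ∨ nextB c last = some 0 ∨ nextB c last = some 1 := by
      unfold nextB kindB
      by_cases ha : PySem.Chars.isalpha c <;> by_cases hd : PySem.Chars.isdigit c <;>
        simp [ha, hd, hvalid]
    rw [← ih (res ++ pfxB c last) (nextB c last) hvalid']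
    rcases hvalid with h | h | h <;> subst h <;>
      by_cases ha : PySem.Chars.isalpha c <;> by_cases hd : PySem.Chars.isdigit c <;>
        simp [loopA, pfxB, nextB, kindB, ha, hd]

-- ===== VERDICT (by name: the statement is the Claim_ definition above) =====
theorem split_alpha_and_digit_spec : Claim_equal_split_alpha_and_digit := by
  intro word _
  unfold Spec_split_alpha_and_digit split_alpha_and_digit split_alpha_and_digit_alt
  exact congrArg String.ofList (mainA word.toList [] none (Or.inl rfl))
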